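-- pv_equiv track=rewrite | github.com/yhyh4420/algorithm_baekjoon | 프로그래머스/2/389479. 서버 증설 횟수/서버 증설 횟수.py | solution
-- ===== SOURCE A (Python) =====
-- def solution(players, m, k):
--     answer = 0
--     servers = [0] * 24
--     for i, player in enumerate(players):
--         server_add = player//m
--         server_now = servers[i]
--         if server_add > server_now:
--             answer += (server_add-server_now)
--             for j in range(i, min(24, i+k)):
--                 servers[j] += (server_add-server_now)
--     return answer
-- ===== SOURCE B (Python) =====
-- def solution(players, m, k):
--     # Two-pointer sliding window: added[j] records servers bought at hour j,
--     # `current` keeps the sum of still-active purchases (window [lo, i)),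
--     # maintained incrementally instead of A's forward range-increments.
--     answer = 0
--     added = []
--     current = 0
--     lo = 0
--     for i, p in enumerate(players):
--         if i > 0:
--             current += added[i - 1]      # yesterday's purchase comes into view
--         while lo < i and lo + k <= i:    # purchases from >= k hours ago expire
--             current -= added[lo]
--             lo += 1
--         shortage = p // m - current
--         d = shortage if shortage > 0 else 0
--         answer += d
--         added.append(d)
--     return answer
-- ===== Notes on version B (the rewrite author's own statement) =====
-- stated objective: alternative
-- what changed: B replaces A's preallocated 24-slot servers array with its inner forward range-increment loop by a two-pointer sliding window over a log of per-hour purchases: the active-server count is maintained incrementally by adding the purchase that comes into view and expiring purchases that leave the k-hour window.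
-- outside the precondition, e.g. on solution([1, 2, 3], 0, 1): A raises ZeroDivisionError, B raises ZeroDivisionError
import Mathlib
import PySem

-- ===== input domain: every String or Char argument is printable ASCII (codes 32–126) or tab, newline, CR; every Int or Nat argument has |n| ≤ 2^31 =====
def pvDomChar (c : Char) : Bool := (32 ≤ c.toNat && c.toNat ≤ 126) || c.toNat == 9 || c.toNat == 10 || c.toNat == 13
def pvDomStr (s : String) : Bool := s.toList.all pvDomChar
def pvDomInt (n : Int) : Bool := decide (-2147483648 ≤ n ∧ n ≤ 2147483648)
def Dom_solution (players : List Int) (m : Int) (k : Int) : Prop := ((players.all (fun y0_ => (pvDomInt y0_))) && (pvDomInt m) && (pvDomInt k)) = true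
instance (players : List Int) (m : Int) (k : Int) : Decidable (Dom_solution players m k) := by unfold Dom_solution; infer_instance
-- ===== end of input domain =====

-- B replaces A's forward range-increments into a preallocated 24-slot array by a two-pointer
-- sliding window over a log of purchases, maintaining the active count incrementally (objective: alternative).

-- ===== PORT A =====
-- loop body of A's for-loop, extracted as a helper (state = (answer, servers))
def stepA (m : Int) (k : Int) (st : Int × List Int) (ip : Int × Int) : Int × List Int :=
  let answer := st.1
  let servers := st.2
  let i := ip.1
  let player := ip.2
  let server_add := PySem.Int.floordiv player m
  let server_now := (PySem.List.pyGet? servers i).getD 0   -- IndexError (none) excluded by Pre_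
  if server_add > server_now then
    (answer + (server_add - server_now),
     (PySem.List.pyRange i (min 24 (i + k)) 1).foldl
       (fun sv j => sv.modify j.toNat (· + (server_add - server_now))) servers)
  else (answer, servers)

def solution (players : List Int) (m : Int) (k : Int) : Int :=
  ((PySem.List.enumerate players).foldl (stepA m k) (0, List.replicate 24 (0 : Int))).1

-- ===== PORT B =====
-- B's while-loop: expire purchases that are out of the window [lo, i)
def shrinkB (added : List Int) (i : Int) (k : Int) (current : Int) (lo : Int) : Int × Int :=
  if h : lo < i ∧ lo + k ≤ i then
    shrinkB added i k (current - (PySem.List.pyGet? added lo).getD 0) (lo + 1)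
  else (current, lo)
termination_by (i - lo).toNat
decreasing_by omega

-- loop body of B's for-loop (state = (answer, added, current, lo))
def stepB (m : Int) (k : Int) (st : Int × List Int × Int × Int) (ip : Int × Int) :
    Int × List Int × Int × Int :=
  let answer := st.1
  let added := st.2.1
  let current := st.2.2.1
  let lo := st.2.2.2
  let i := ip.1
  let p := ip.2
  let current := if i > 0 then current + (PySem.List.pyGet? added (i - 1)).getD 0 else current
  let cl := shrinkB added i k current lo
  let current := cl.1
  let lo := cl.2
  let shortage := PySem.Int.floordiv p m - current
  let d := if shortage > 0 then shortage else 0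
  (answer + d, added ++ [d], current, lo)

def solution_alt (players : List Int) (m : Int) (k : Int) : Int :=
  ((PySem.List.enumerate players).foldl (stepB m k) (0, [], 0, 0)).1

-- ===== PRECONDITION & SPEC =====
-- Pre_ excludes exactly the inputs where A raises: m = 0 (ZeroDivisionError on player//m)
-- and more than 24 hours of data (IndexError on servers[i]).
def Pre_solution (players : List Int) (m : Int) (k : Int) : Prop :=
  m ≠ 0 ∧ players.length ≤ 24
instance (players : List Int) (m : Int) (k : Int) : Decidable (Pre_solution players m k) := by
  unfold Pre_solution; infer_instance

def pvWitness_solution : List Int × Int × Int := ([300, 1000, 500], 100, 2)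

def Spec_solution (players : List Int) (m : Int) (k : Int) (out : Int) : Prop := out = solution_alt players m k
instance (players : List Int) (m : Int) (k : Int) (out : Int) : Decidable (Spec_solution players m k out) := by unfold Spec_solution; infer_instance

-- ===== CLAIM (what is proved, stated in full; the proofs are below) =====
def Claim_equal_solution : Prop := ∀ (players : List Int) (m : Int) (k : Int), Dom_solution players m k → Pre_solution players m k → Spec_solution players m k (solution players m k)

-- ===== LEMMAS AND PROOFS =====

-- sum of added[a:b] (the window sums B maintains incrementally)
def wsum (xs : List Int) (a b : Int) : Int :=
  ((PySem.List.pyRange a b 1).map (fun j => (PySem.List.pyGet? xs j).getD 0)).sum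

lemma wsum_nil (xs : List Int) {a b : Int} (h : b ≤ a) : wsum xs a b = 0 := by
  unfold wsum; rw [PySem.List.pyRange_one_eq_nil h]; simp

lemma wsum_cons (xs : List Int) {a b : Int} (h : a < b) :
    wsum xs a b = (PySem.List.pyGet? xs a).getD 0 + wsum xs (a + 1) b := by
  unfold wsum; rw [PySem.List.pyRange_one_cons h]; simp

lemma wsum_snoc (xs : List Int) {a b : Int} (h : a ≤ b) :
    wsum xs a (b + 1) = wsum xs a b + (PySem.List.pyGet? xs b).getD 0 := by
  unfold wsum; rw [PySem.List.pyRange_one_succ_right h]; simp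

lemma wsum_append (xs : List Int) (d : Int) :
    ∀ (n : Nat) (a b : Int), (b - a).toNat = n → 0 ≤ a → b ≤ (xs.length : Int) →
      wsum (xs ++ [d]) a b = wsum xs a b := by
  intro n
  induction n with
  | zero =>
    intro a b hn _ _
    rw [wsum_nil _ (by omega), wsum_nil _ (by omega)]
  | succ n ih =>
    intro a b hn ha hb
    have hab : a < b := by omega
    rw [wsum_cons _ hab, wsum_cons _ hab, ih (a + 1) b (by omega) (by omega) hb]
    have hlt : a < (xs.length : Int) := by omega
    have : PySem.List.pyGet? (xs ++ [d]) a = PySem.List.pyGet? xs a := by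
      have ha' : a = ((a.toNat : Nat) : Int) := by omega
      rw [ha', PySem.List.pyGet?_natCast, PySem.List.pyGet?_natCast,
          List.getElem?_append_left (by omega)]
    rw [this]

-- B's while-loop, solved: it moves lo up to max lo (min i (i-k+1)) and subtracts that span
lemma shrinkB_spec (added : List Int) (i k : Int) :
    ∀ (n : Nat) (current lo : Int), (i - lo).toNat = n → lo ≤ i →
      shrinkB added i k current lo =
        (current - wsum added lo (max lo (min i (i - k + 1))), max lo (min i (i - k + 1))) := by
  intro n
  induction n with
  | zero =>
    intro current lo hn hle
    have hi : lo = i := by omega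
    rw [shrinkB, dif_neg (by omega)]
    have hmax : max lo (min i (i - k + 1)) = lo := by omega
    rw [hmax, wsum_nil _ le_rfl]; simp
  | succ n ih =>
    intro current lo hn hle
    by_cases hc : lo < i ∧ lo + k ≤ i
    · rw [shrinkB, dif_pos hc,
          ih (current - (PySem.List.pyGet? added lo).getD 0) (lo + 1) (by omega) (by omega)]
      have hM : max (lo + 1) (min i (i - k + 1)) = max lo (min i (i - k + 1)) := by omega
      rw [hM]
      have hlt : lo < max lo (min i (i - k + 1)) := by omega
      rw [wsum_cons added hlt]
      simp only [Prod.mk.injEq]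
      exact ⟨by ring, trivial⟩
    · rw [shrinkB, dif_neg hc]
      have hmax : max lo (min i (i - k + 1)) = lo := by omega
      rw [hmax, wsum_nil _ le_rfl]; simp

-- A's inner increment loop, described pointwise
lemma foldl_modify_getElem? (c : Int) :
    ∀ (n : Nat) (a b : Int), (b - a).toNat = n → 0 ≤ a →
    ∀ (sv : List Int) (t : Nat),
      ((PySem.List.pyRange a b 1).foldl (fun sv j => sv.modify j.toNat (· + c)) sv)[t]? =
        if a ≤ (t : Int) ∧ (t : Int) < b then sv[t]?.map (· + c) else sv[t]? := by
  intro n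
  induction n with
  | zero =>
    intro a b hn ha sv t
    rw [PySem.List.pyRange_one_eq_nil (by omega)]
    simp only [List.foldl_nil]
    rw [if_neg (by omega)]
  | succ n ih =>
    intro a b hn ha sv t
    have hab : a < b := by omega
    rw [PySem.List.pyRange_one_cons hab, List.foldl_cons,
        ih (a + 1) b (by omega) (by omega)]
    have hmod := List.getElem?_modify (· + c) a.toNat sv t
    by_cases h1 : a + 1 ≤ (t : Int) ∧ (t : Int) < b
    · rw [if_pos h1, if_pos (by omega : a ≤ (t : Int) ∧ (t : Int) < b), hmod]
      have hne : ¬ a.toNat = t := by omega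
      cases sv[t]? <;> simp [hne]
    · rw [if_neg h1]
      by_cases h2 : a ≤ (t : Int) ∧ (t : Int) < b
      · rw [if_pos h2, hmod]
        have heq : a.toNat = t := by omega
        cases sv[t]? <;> simp [heq]
      · rw [if_neg h2, hmod]
        have hne : ¬ a.toNat = t := by omega
        cases sv[t]? <;> simp [hne]

-- main loop invariant: A's servers array encodes, for every future hour t, the window sum
-- of B's purchase log, and B's (current, lo) are the running window over that log
lemma main_inv (m k : Int) :
    ∀ (rest : List Int) (n : Nat) (ans : Int) (servers added : List Int) (current lo : Int),
      n + rest.length ≤ 24 →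
      added.length = n →
      lo = max 0 (min ((n : Int) - 1) ((n : Int) - k)) →
      current = wsum added lo ((n : Int) - 1) →
      (∀ t : Nat, n ≤ t → t < 24 →
        servers[t]? = some (wsum added (max 0 ((t : Int) + 1 - k)) (n : Int))) →
      ((PySem.List.enumerate rest (n : Int)).foldl (stepA m k) (ans, servers)).1 =
      ((PySem.List.enumerate rest (n : Int)).foldl (stepB m k) (ans, added, current, lo)).1 := by
  intro rest
  induction rest with
  | nil => intro n ans servers added current lo _ _ _ _ _; simp [PySem.List.enumerate]
  | cons p rest ih =>
    intro n ans servers added current lo hlen hlenadd hlo hcur hinv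
    rw [PySem.List.enumerate_cons, List.foldl_cons, List.foldl_cons]
    have hn24 : n < 24 := by simp at hlen; omega
    set d0 : Int := PySem.Int.floordiv p m with hd0
    -- B's read value after the += and the while-loop
    have hlo_le : lo ≤ (n : Int) := by omega
    have hcur1 : (if (n : Int) > 0 then current + (PySem.List.pyGet? added ((n : Int) - 1)).getD 0
        else current) = wsum added lo (n : Int) := by
      by_cases hn0 : (n : Int) > 0
      · rw [if_pos hn0, hcur, ← wsum_snoc added (by omega : lo ≤ (n : Int) - 1)]
        congr 1; omega
      · rw [if_neg hn0, hcur]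
        have hn' : n = 0 := by omega
        subst hn'
        rw [wsum_nil _ (by omega), wsum_nil _ (by omega)]
    have hshr := shrinkB_spec added (n : Int) k ((n : Int) - lo).toNat
      (wsum added lo (n : Int)) lo rfl hlo_le
    set lo' : Int := max lo (min (n : Int) ((n : Int) - k + 1)) with hlo'
    have hlo'eq : lo' = max 0 (min (n : Int) ((n : Int) + 1 - k)) := by omega
    have hcur2 : wsum added lo (n : Int) - wsum added lo lo' = wsum added lo' (n : Int) := by
      have h1 : lo ≤ lo' := by omega
      have h2 : lo' ≤ (n : Int) := by omega
      have hsplit : wsum added lo (n : Int) = wsum added lo lo' + wsum added lo' (n : Int) := by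
        unfold wsum
        rw [PySem.List.pyRange_one_append lo lo' (n : Int) h1 h2, List.map_append, List.sum_append]
      omega
    -- A's read value
    have hsrv := hinv n le_rfl hn24
    have hSa : wsum added (max 0 ((n : Int) + 1 - k)) (n : Int) = wsum added lo' (n : Int) := by
      rw [hlo'eq]
      by_cases hk1 : (n : Int) + 1 - k ≤ (n : Int)
      · congr 1; omega
      · rw [wsum_nil _ (by omega), wsum_nil _ (by omega)]
    have hgetA : (PySem.List.pyGet? servers (n : Int)).getD 0 = wsum added lo' (n : Int) := by
      rw [PySem.List.pyGet?_natCast, hsrv, hSa]; rfl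
    set S : Int := wsum added lo' (n : Int) with hS
    -- unfold one step of each side
    have hstepB : stepB m k (ans, added, current, lo) ((n : Int), p) =
        (ans + (if d0 - S > 0 then d0 - S else 0), added ++ [if d0 - S > 0 then d0 - S else 0],
         S, lo') := by
      simp only [stepB, hcur1, hshr, hcur2, ← hd0]
    have hcast : ((n : Int) + 1) = (((n + 1 : Nat)) : Int) := by push_cast; ring
    by_cases hc : d0 > S
    · -- servers are added
      have hA : stepA m k (ans, servers) ((n : Int), p) =
          (ans + (d0 - S),
           (PySem.List.pyRange (n : Int) (min 24 ((n : Int) + k)) 1).foldl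
             (fun sv j => sv.modify j.toNat (· + (d0 - S))) servers) := by
        simp only [stepA, hgetA, ← hd0]
        rw [if_pos hc]
      have hB : stepB m k (ans, added, current, lo) ((n : Int), p) =
          (ans + (d0 - S), added ++ [d0 - S], S, lo') := by
        rw [hstepB, if_pos (by omega)]
      rw [hA, hB, hcast]
      apply ih
      · simp at hlen ⊢; omega
      · simp [hlenadd]
      · omega
      · -- new current: S = wsum (added ++ [d0 - S]) lo' ((n+1) - 1)
        have : ((n + 1 : Nat) : Int) - 1 = (n : Int) := by push_cast; ring
        rw [this, wsum_append added (d0 - S) ((n : Int) - lo').toNat lo' (n : Int) rfl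
              (by omega) (by omega)]
      · intro t ht1 ht24
        rw [foldl_modify_getElem? (d0 - S) ((min 24 ((n : Int) + k)) - (n : Int)).toNat
              (n : Int) (min 24 ((n : Int) + k)) rfl (by omega)]
        have hold := hinv t (by omega) ht24
        have hlow : (0 : Int) ≤ max 0 ((t : Int) + 1 - k) := by omega
        by_cases hwin : (t : Int) < (n : Int) + k
        · -- the new purchase is in hour t's window
          rw [if_pos (by omega), hold]
          simp only [Option.map_some, Option.some.injEq]
          have hle : max 0 ((t : Int) + 1 - k) ≤ (n : Int) := by omega
          rw [show ((n + 1 : Nat) : Int) = (n : Int) + 1 by push_cast; ring,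
              wsum_snoc _ hle,
              wsum_append added (d0 - S) ((n : Int) - max 0 ((t : Int) + 1 - k)).toNat _ _
                rfl hlow (by omega)]
          have hget : (PySem.List.pyGet? (added ++ [d0 - S]) (n : Int)).getD 0 = d0 - S := by
            rw [PySem.List.pyGet?_natCast]
            simp [hlenadd]
          rw [hget]
        · -- out of the window: the appended entry contributes nothing
          rw [if_neg (by omega), hold]
          congr 1
          rw [show ((n + 1 : Nat) : Int) = (n : Int) + 1 by push_cast; ring]
          by_cases hle : max 0 ((t : Int) + 1 - k) ≤ (n : Int)
          · rw [wsum_snoc _ hle,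
                wsum_append added (d0 - S) ((n : Int) - max 0 ((t : Int) + 1 - k)).toNat _ _
                  rfl hlow (by omega)]
            have hget : (PySem.List.pyGet? (added ++ [d0 - S]) (n : Int)).getD 0 = d0 - S := by
              rw [PySem.List.pyGet?_natCast]
              simp [hlenadd]
            -- hwin is false: t ≥ n + k, so window start > n … contradiction with hle
            exfalso; omega
          · rw [wsum_nil _ (by omega), wsum_nil _ (by omega)]
    · -- no addition this hour
      have hA : stepA m k (ans, servers) ((n : Int), p) = (ans, servers) := by
        simp only [stepA, hgetA, ← hd0]
        rw [if_neg hc]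
      have hB : stepB m k (ans, added, current, lo) ((n : Int), p) =
          (ans + 0, added ++ [0], S, lo') := by
        rw [hstepB, if_neg (by omega)]
      rw [hA, hB, hcast]
      have hzero := ih (n + 1) (ans + 0) servers (added ++ [0]) S lo'
        (by simp at hlen ⊢; omega)
        (by simp [hlenadd])
        (by omega)
        (by
          have : ((n + 1 : Nat) : Int) - 1 = (n : Int) := by push_cast; ring
          rw [this, wsum_append added 0 ((n : Int) - lo').toNat lo' (n : Int) rfl
                (by omega) (by omega)])
        (by
          intro t ht1 ht24
          have hold := hinv t (by omega) ht24
          rw [hold]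
          congr 1
          rw [show ((n + 1 : Nat) : Int) = (n : Int) + 1 by push_cast; ring]
          have hlow : (0 : Int) ≤ max 0 ((t : Int) + 1 - k) := by omega
          by_cases hle : max 0 ((t : Int) + 1 - k) ≤ (n : Int)
          · rw [wsum_snoc _ hle,
                wsum_append added 0 ((n : Int) - max 0 ((t : Int) + 1 - k)).toNat _ _
                  rfl hlow (by omega)]
            have hget : (PySem.List.pyGet? (added ++ [0]) (n : Int)).getD 0 = 0 := by
              rw [PySem.List.pyGet?_natCast]
              simp [hlenadd]
            rw [hget]; ring
          · rw [wsum_nil _ (by omega), wsum_nil _ (by omega)])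
      simpa using hzero

-- ===== VERDICT (by name: the statement is the Claim_ definition above) =====
theorem solution_spec : Claim_equal_solution := by
  intro players m k _ hpre
  unfold Spec_solution solution solution_alt
  have h := main_inv m k players 0 0 (List.replicate 24 (0 : Int)) [] 0 0
    (by simpa using hpre.2)
    rfl
    (by omega)
    (by rw [wsum_nil _ (by omega)])
    (by
      intro t _ ht24
      rw [List.getElem?_replicate, if_pos ht24, wsum_nil _ (by omega)])
  simpa using h
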